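-- pv_equiv track=rewrite | github.com/Delphboy/image-captioning | src/utils/preprocess.py | preprocess_captions
-- ===== SOURCE A (Python) =====
-- from typing import List
--
-- def preprocess_captions(captions: List[str]) -> List[str]:
--     # Clean sentence list following: https://cs.stanford.edu/people/karpathy/cvpr2015.pdf Section 4
--     captions = [caption.lower() for caption in captions]
--
--     # Disgard non-alphanumeric characters
--     non_alphanumeric = [chr(i) for i in range(33, 128) if not chr(i).isalnum()]
--     cleaned = []
--
--     for sentence in captions:
--         for char in non_alphanumeric:
--             sentence = sentence.replace(char, "")
--         while "  " in sentence:
--             sentence = sentence.replace("  ", " ")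
--         cleaned.append(sentence.strip())
--     return cleaned
-- ===== SOURCE B (Python) =====
-- def preprocess_captions(captions):
--     # One linear state-machine pass per caption instead of 95 replace() passes plus repeated "  " rescans.
--     punct = {chr(i) for i in range(33, 128) if not chr(i).isalnum()}
--     cleaned = []
--     for caption in captions:
--         buf = []
--         prev_space = False
--         for ch in caption.lower():
--             if ch in punct:
--                 continue
--             if ch == ' ':
--                 if not prev_space:
--                     buf.append(' ')
--                     prev_space = True
--             else:
--                 buf.append(ch)
--                 prev_space = False
--         cleaned.append(''.join(buf).strip())
--     return cleaned
-- ===== Notes on version B (the rewrite author's own statement) =====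
-- stated objective: faster
-- what changed: Replaces A's 95 per-punctuation replace() passes plus repeated whole-string ' ' rescans with a single left-to-right state-machine pass per caption (skip punctuation, collapse space runs with a prev_space flag).
import Mathlib
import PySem

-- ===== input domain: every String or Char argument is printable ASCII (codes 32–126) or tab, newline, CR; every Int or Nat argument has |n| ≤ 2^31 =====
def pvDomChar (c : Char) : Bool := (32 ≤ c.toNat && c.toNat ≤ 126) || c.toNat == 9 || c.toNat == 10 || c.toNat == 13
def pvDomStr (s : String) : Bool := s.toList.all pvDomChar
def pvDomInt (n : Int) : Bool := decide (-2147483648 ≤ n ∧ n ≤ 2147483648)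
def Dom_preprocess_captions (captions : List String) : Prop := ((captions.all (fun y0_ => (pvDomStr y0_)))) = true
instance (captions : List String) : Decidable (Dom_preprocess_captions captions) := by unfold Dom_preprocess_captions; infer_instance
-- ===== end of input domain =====

-- B replaces A's 95 per-punctuation replace passes and repeated '  ' rescans by one
-- left-to-right state-machine pass per caption; return values agree (no mutation involved).

-- ===== PORT A =====
-- the 'while "  " in sentence' loop; fuel = current length is enough since each replace shortens the string
def pvWhileCollapse : Nat → String → String
  | 0, s => s
  | fuel + 1, s =>
    if PySem.Str.isIn "  " s then pvWhileCollapse fuel (PySem.Str.replace s "  " " ") else s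

def preprocess_captions (captions : List String) : List String :=
  let captions := captions.map (fun caption => PySem.Str.lower caption)
  let non_alphanumeric : List Char :=
    ((PySem.List.pyRange 33 128 1).map (fun i => Char.ofNat i.toNat)).filter
      (fun c => !(PySem.Str.strIsalnum (String.ofList [c])))
  captions.foldl (fun cleaned sentence =>
    let sentence := non_alphanumeric.foldl
      (fun s ch => PySem.Str.replace s (String.ofList [ch]) "") sentence
    let sentence := pvWhileCollapse sentence.toList.length sentence
    cleaned ++ [PySem.Str.strip sentence]) []

-- ===== PORT B =====
def preprocess_captions_alt (captions : List String) : List String :=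
  let punct : PySem.Set Char := PySem.Set.ofList
    (((PySem.List.pyRange 33 128 1).map (fun i => Char.ofNat i.toNat)).filter
      (fun c => !(PySem.Str.strIsalnum (String.ofList [c]))))
  captions.foldl (fun cleaned caption =>
    let r := (PySem.Str.lower caption).toList.foldl
      (fun (st : List Char × Bool) ch =>
        if PySem.Set.contains punct ch then st
        else if ch = ' ' then (if st.2 then st else (st.1 ++ [' '], true))
        else (st.1 ++ [ch], false)) ([], false)
    cleaned ++ [PySem.Str.strip (String.ofList r.1)]) []

-- ===== PRECONDITION & SPEC =====
def Spec_preprocess_captions (captions : List String) (out : List String) : Prop := out = preprocess_captions_alt captions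
instance (captions : List String) (out : List String) : Decidable (Spec_preprocess_captions captions out) := by unfold Spec_preprocess_captions; infer_instance

-- ===== CLAIM (what is proved, stated in full; the proofs are below) =====
def Claim_equal_preprocess_captions : Prop := ∀ (captions : List String), Dom_preprocess_captions captions → Spec_preprocess_captions captions (preprocess_captions captions)

-- ===== LEMMAS AND PROOFS =====

-- the punctuation alphabet both programs build
def pvPunct : List Char :=
  ((PySem.List.pyRange 33 128 1).map (fun i => Char.ofNat i.toNat)).filter
    (fun c => !(PySem.Str.strIsalnum (String.ofList [c])))

-- replace s [c] "" deletes exactly the occurrences of c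
lemma replace_go_single (c : Char) : ∀ (fuel : Nat) (l acc : List Char), l.length ≤ fuel →
    PySem.Chars.replace.go [c] [] fuel l acc = acc.reverse ++ l.filter (fun x => x != c) := by
  intro fuel
  induction fuel with
  | zero => intro l acc h; simp at h; simp [h, PySem.Chars.replace.go]
  | succ n ih =>
    intro l acc h
    cases l with
    | nil => simp [PySem.Chars.replace.go]
    | cons a t =>
      by_cases hac : c = a
      · subst hac
        have hpre : List.isPrefixOf [c] (c :: t) = true := by simp [List.isPrefixOf]
        simp only [PySem.Chars.replace.go]
        rw [if_pos hpre]
        simp only [List.length_cons, List.length_nil, List.drop_succ_cons, List.drop_zero,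
          List.reverse_nil, List.nil_append]
        rw [ih t acc (by simpa using h)]
        simp
      · have hpre : List.isPrefixOf [c] (a :: t) = false := by
          simp [List.isPrefixOf]; exact hac
        simp only [PySem.Chars.replace.go]
        rw [if_neg (by simp [hpre])]
        rw [ih t (a :: acc) (by simpa using h)]
        simp [bne, Ne.symm hac]

lemma replace_single (c : Char) (l : List Char) :
    PySem.Chars.replace l [c] [] = l.filter (fun x => x != c) := by
  have := replace_go_single c l.length l [] le_rfl
  simpa [PySem.Chars.replace] using this

-- folding single-character deletions over a list L filters out everything in L
lemma foldl_replace_str (L : List Char) : ∀ (s : String),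
    (L.foldl (fun t c => PySem.Str.replace t (String.ofList [c]) "") s).toList
      = s.toList.filter (fun x => !(L.contains x)) := by
  induction L with
  | nil => intro s; simp
  | cons c L ih =>
    intro s
    simp only [List.foldl_cons]
    rw [ih]
    simp only [PySem.Str.toList_replace, String.toList_ofList]
    have : ("" : String).toList = [] := rfl
    rw [this, replace_single, List.filter_filter]
    apply List.filter_congr
    intro x _
    by_cases hx : x = c <;> simp [hx, Bool.and_comm]

-- two consecutive spaces, structurally
def hasDD : List Char → Bool
  | [] => false
  | [_] => false
  | a :: b :: t => (a == ' ' && b == ' ') || hasDD (b :: t)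

lemma infix_dd : ∀ l : List Char, [' ', ' '] <:+: l ↔ hasDD l = true := by
  intro l
  induction l with
  | nil => simp [hasDD]
  | cons a t ih =>
    cases t with
    | nil =>
      simp [hasDD, List.infix_cons_iff, List.cons_prefix_cons]
    | cons b u =>
      rw [List.infix_cons_iff, ih]
      simp [hasDD, List.cons_prefix_cons]
      tauto

lemma isIn_dd (l : List Char) : PySem.Chars.isIn [' ', ' '] l = hasDD l := by
  cases h : hasDD l with
  | true => exact (PySem.Chars.isIn_iff_infix _ _).mpr ((infix_dd l).mpr h)
  | false =>
    rw [PySem.Chars.isIn_eq_false_iff]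
    rw [infix_dd l, h]; simp

-- one left-to-right pass of replace("  ", " ")
def onepass : List Char → List Char
  | [] => []
  | [c] => [c]
  | a :: b :: t => if a == ' ' && b == ' ' then ' ' :: onepass t else a :: onepass (b :: t)

lemma replace_go_pair : ∀ (fuel : Nat) (l acc : List Char), l.length ≤ fuel →
    PySem.Chars.replace.go [' ', ' '] [' '] fuel l acc = acc.reverse ++ onepass l := by
  intro fuel
  induction fuel with
  | zero => intro l acc h; simp at h; simp [h, PySem.Chars.replace.go, onepass]
  | succ n ih =>
    intro l acc h
    match l with
    | [] => simp [PySem.Chars.replace.go, onepass]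
    | [c] =>
      have hpre : List.isPrefixOf [' ', ' '] [c] = false := by
        simp [List.isPrefixOf]
      simp only [PySem.Chars.replace.go]
      rw [if_neg (by simp [hpre])]
      cases n with
      | zero => simp [PySem.Chars.replace.go, onepass]
      | succ m => simp [PySem.Chars.replace.go, onepass]
    | a :: b :: t =>
      simp only [PySem.Chars.replace.go]
      by_cases hab : a = ' ' ∧ b = ' '
      · obtain ⟨ha, hb⟩ := hab; subst ha; subst hb
        have hpre : List.isPrefixOf [' ', ' '] (' ' :: ' ' :: t) = true := by
          simp [List.isPrefixOf]
        rw [if_pos hpre]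
        simp only [List.length_cons, List.length_nil, List.drop_succ_cons, List.drop_zero]
        have hacc : ([' '].reverse ++ acc) = ' ' :: acc := by simp
        rw [hacc]
        simp only [List.length_cons] at h
        rw [ih t (' ' :: acc) (by omega)]
        simp [onepass]
      · have hpre : List.isPrefixOf [' ', ' '] (a :: b :: t) = false := by
          simp [List.isPrefixOf]; tauto
        rw [if_neg (by simp [hpre])]
        simp only [List.length_cons] at h
        rw [ih (b :: t) (a :: acc) (by simp; omega)]
        have hcond : (a == ' ' && b == ' ') = false := by simp; tauto
        simp [onepass, hcond]

lemma replace_pair (l : List Char) :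
    PySem.Chars.replace l [' ', ' '] [' '] = onepass l := by
  have := replace_go_pair l.length l [] le_rfl
  simpa [PySem.Chars.replace] using this

lemma onepass_length_le : ∀ l : List Char, (onepass l).length ≤ l.length := by
  intro l
  induction l using onepass.induct with
  | case1 => simp [onepass]
  | case2 c => simp [onepass]
  | case3 a b t hd ih =>
    rw [onepass, if_pos hd]
    simp only [List.length_cons] at *
    omega
  | case4 a b t hd ih =>
    rw [onepass, if_neg (by simp [hd])]
    simp only [List.length_cons] at *
    omega

lemma onepass_length_lt : ∀ l : List Char, hasDD l = true → (onepass l).length < l.length := by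
  intro l
  induction l using onepass.induct with
  | case1 => simp [hasDD]
  | case2 c => simp [hasDD]
  | case3 a b t hd ih =>
    intro _
    rw [onepass, if_pos hd]
    have := onepass_length_le t
    simp only [List.length_cons] at *
    omega
  | case4 a b t hd ih =>
    intro h
    rw [onepass, if_neg (by simp [hd])]
    have hbt : hasDD (b :: t) = true := by
      simp [hasDD] at h ⊢
      rcases h with h | h
      · rw [h.1, h.2] at hd; simp at hd
      · exact h
    have := ih hbt
    simp only [List.length_cons] at *
    omega

-- the space-collapsing state machine (prev-appended-was-space flag)
def sm : Bool → List Char → List Char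
  | _, [] => []
  | p, c :: t => if c = ' ' then (if p then sm true t else ' ' :: sm true t) else c :: sm false t

lemma sm_onepass : ∀ (l : List Char) (p : Bool), sm p (onepass l) = sm p l := by
  intro l
  induction l using onepass.induct with
  | case1 => intro p; simp [onepass]
  | case2 c => intro p; simp [onepass]
  | case3 a b t hd ih =>
    intro p
    have ha : a = ' ' := by simp at hd; exact hd.1
    have hb : b = ' ' := by simp at hd; exact hd.2
    subst ha; subst hb
    rw [onepass, if_pos hd]
    cases p <;> simp [sm, ih]
  | case4 a b t hd ih =>
    intro p
    rw [onepass, if_neg (by simp [hd])]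
    by_cases ha : a = ' '
    · subst ha
      cases p <;> simp [sm, ih]
    · simp [sm, ha, ih]

def headSpace (l : List Char) : Bool := l.head? == some ' '

lemma sm_id : ∀ (l : List Char) (p : Bool), hasDD l = false →
    (p = true → headSpace l = false) → sm p l = l := by
  intro l
  induction l with
  | nil => intro p _ _; simp [sm]
  | cons c t ih =>
    intro p hdd hp
    by_cases hc : c = ' '
    · subst hc
      have hpf : p = false := by
        cases p
        · rfl
        · exact absurd (hp rfl) (by simp [headSpace])
      subst hpf
      have h1 : hasDD t = false := by
        cases t with
        | nil => simp [hasDD]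
        | cons b u => simp [hasDD] at hdd ⊢; tauto
      have h2 : headSpace t = false := by
        cases t with
        | nil => simp [headSpace]
        | cons b u => simp [hasDD] at hdd; simp [headSpace]; tauto
      rw [show sm false (' ' :: t) = ' ' :: sm true t from by simp [sm],
        ih true h1 (fun _ => h2)]
    · have h1 : hasDD t = false := by
        cases t with
        | nil => simp [hasDD]
        | cons b u => simp [hasDD] at hdd ⊢; tauto
      simp only [sm, if_neg hc]
      rw [ih false h1 (by simp)]

-- list-level twin of pvWhileCollapse
def collapseL : Nat → List Char → List Char
  | 0, l => l
  | fuel + 1, l =>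
    if PySem.Chars.isIn [' ', ' '] l then collapseL fuel (PySem.Chars.replace l [' ', ' '] [' ']) else l

lemma pvWhileCollapse_toList : ∀ (fuel : Nat) (s : String),
    (pvWhileCollapse fuel s).toList = collapseL fuel s.toList := by
  intro fuel
  induction fuel with
  | zero => intro s; simp [pvWhileCollapse, collapseL]
  | succ n ih =>
    intro s
    have h2 : ("  " : String).toList = [' ', ' '] := by decide
    have h1 : (" " : String).toList = [' '] := by decide
    have hcond : PySem.Str.isIn "  " s = PySem.Chars.isIn [' ', ' '] s.toList := by
      rw [PySem.Str.isIn, h2]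
    have hrep : (PySem.Str.replace s "  " " ").toList
        = PySem.Chars.replace s.toList [' ', ' '] [' '] := by
      rw [PySem.Str.toList_replace, h2, h1]
    simp only [pvWhileCollapse, collapseL]
    by_cases hc : PySem.Chars.isIn [' ', ' '] s.toList = true
    · rw [if_pos (by rw [hcond]; exact hc), if_pos hc, ih, hrep]
    · rw [if_neg (by rw [hcond]; exact hc), if_neg hc]

lemma collapseL_eq_sm : ∀ (fuel : Nat) (l : List Char), l.length ≤ fuel →
    collapseL fuel l = sm false l := by
  intro fuel
  induction fuel with
  | zero =>
    intro l h
    simp at h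
    simp [h, collapseL, sm]
  | succ n ih =>
    intro l h
    simp only [collapseL, isIn_dd]
    cases hdd : hasDD l with
    | true =>
      rw [if_pos rfl, replace_pair]
      have hlt := onepass_length_lt l hdd
      rw [ih (onepass l) (by omega)]
      exact sm_onepass l false
    | false =>
      rw [if_neg (show ¬(false = true) by simp)]
      exact (sm_id l false hdd (by simp)).symm

-- B's inner fold builds sm over the filtered characters
lemma foldB (pb : Char → Bool) : ∀ (l buf : List Char) (p : Bool),
    (l.foldl (fun (st : List Char × Bool) ch =>
        if pb ch then st
        else if ch = ' ' then (if st.2 then st else (st.1 ++ [' '], true))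
        else (st.1 ++ [ch], false)) (buf, p)).1
      = buf ++ sm p (l.filter (fun x => !pb x)) := by
  intro l
  induction l with
  | nil => intro buf p; simp [sm]
  | cons c t ih =>
    intro buf p
    simp only [List.foldl_cons, List.filter_cons]
    by_cases hc : pb c = true
    · rw [if_pos hc, ih buf p]
      simp [hc]
    · rw [if_neg hc]
      have hcf : pb c = false := by simpa using hc
      by_cases hsp' : c = ' '
      · subst hsp'
        rw [if_pos rfl]
        cases p with
        | true =>
          rw [if_pos (show ((buf, true).2 : Bool) = true from rfl)]
          rw [ih buf true]
          simp [sm, hcf]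
        | false =>
          rw [if_neg (show ¬(((buf, false).2 : Bool) = true) by simp)]
          rw [ih (buf ++ [' ']) true]
          simp [sm, hcf]
      · rw [if_neg hsp']
        rw [ih (buf ++ [c]) false]
        simp [sm, hsp', hcf]

-- the per-caption results agree
lemma element_eq (s : String) :
    PySem.Str.strip
      (pvWhileCollapse
        (pvPunct.foldl (fun t c => PySem.Str.replace t (String.ofList [c]) "") (PySem.Str.lower s)).toList.length
        (pvPunct.foldl (fun t c => PySem.Str.replace t (String.ofList [c]) "") (PySem.Str.lower s)))
    = PySem.Str.strip (String.ofList
        ((PySem.Str.lower s).toList.foldl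
          (fun (st : List Char × Bool) ch =>
            if PySem.Set.contains (PySem.Set.ofList pvPunct) ch then st
            else if ch = ' ' then (if st.2 then st else (st.1 ++ [' '], true))
            else (st.1 ++ [ch], false)) ([], false)).1) := by
  apply congrArg PySem.Str.strip
  apply String.toList_inj.mp
  rw [String.toList_ofList, pvWhileCollapse_toList, collapseL_eq_sm _ _ le_rfl,
    foldl_replace_str]
  have hcontains : ∀ ch, PySem.Set.contains (PySem.Set.ofList pvPunct) ch = pvPunct.contains ch := by
    intro ch
    simp only [PySem.Set.contains]
    rw [Bool.eq_iff_iff]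
    simp [PySem.Set.mem_ofList]
  rw [foldB (fun ch => PySem.Set.contains (PySem.Set.ofList pvPunct) ch)]
  simp only [List.nil_append]
  have : (fun x => !(PySem.Set.ofList pvPunct).contains x)
      = (fun x => !pvPunct.contains x) := by
    funext x; rw [hcontains]
  rw [this]

-- ===== VERDICT (by name: the statement is the Claim_ definition above) =====
theorem preprocess_captions_spec : Claim_equal_preprocess_captions := by
  intro captions _
  unfold Spec_preprocess_captions preprocess_captions preprocess_captions_alt
  simp only
  rw [PySem.List.foldl_append_singleton_eq_map, PySem.List.foldl_append_singleton_eq_map,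
    List.map_map]
  apply List.map_congr_left
  intro s _
  exact element_eq s
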